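-- pv_equiv track=rewrite | github.com/Freakwill/useful_tools | mystr.py | findbrace
-- ===== SOURCE A (Python) =====
-- def findbrace(s, b='{}'):
--     '''find the content in braces
-- >>> findbrace('aaa{bbb{ccc}ddd}eee{fff}')
-- ['{bbb{ccc}ddd}', '{fff}']
-- '''
--     left,right=b
--     flag=0
--     lst=[]
--     for k,a in enumerate(s):
--         if a==left:
--             flag+=1
--             if flag==1:  # first {
--                 L=k
--         elif a==right:
--             if flag==1:  # last }
--                 lst.append(s[L:k+1])
--             flag-=1
--     return lst
-- ===== SOURCE B (Python) =====
-- def findbrace(s, b='{}'):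
--     '''find the content in braces (prefix-depth table version)'''
--     left, right = b
--     # d[k] = (#left - #right) among s[:k], built in one pass
--     d = []
--     f = 0
--     for a in s:
--         d.append(f)
--         f += 1 if a == left else (-1 if a == right else 0)
--     out = []
--     L = 0
--     for k, (a, dk) in enumerate(zip(s, d)):
--         if a == left:
--             if dk == 0:
--                 L = k
--         elif a == right and dk == 1:
--             out.append(s[L:k+1])
--     return out
-- ===== Notes on version B (the rewrite author's own statement) =====
-- stated objective: alternative
-- what changed: Replaces A's single stateful counter loop by a two-pass decomposition: first build a prefix-depth table d (d[k] = lefts minus rights in s[:k]), then scan zip(s, d) and decide start/emit positions purely from d[k], with no running counter in the extraction pass.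
import Mathlib
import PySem

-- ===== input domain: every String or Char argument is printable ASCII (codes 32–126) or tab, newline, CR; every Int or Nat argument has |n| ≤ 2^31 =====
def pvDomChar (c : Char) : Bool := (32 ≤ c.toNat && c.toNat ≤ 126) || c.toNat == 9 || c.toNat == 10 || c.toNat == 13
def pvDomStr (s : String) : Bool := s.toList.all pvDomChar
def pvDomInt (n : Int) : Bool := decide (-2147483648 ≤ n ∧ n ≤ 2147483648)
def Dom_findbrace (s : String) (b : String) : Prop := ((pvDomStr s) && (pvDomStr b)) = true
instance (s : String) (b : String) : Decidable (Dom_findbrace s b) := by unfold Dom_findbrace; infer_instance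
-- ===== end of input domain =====

-- B replaces A's single counter loop by a prefix-depth table plus a table-driven extraction pass (objective: alternative decomposition, same cost).

-- ===== PORT A =====
-- literal port of A's loop: state (flag, L, lst), branches in A's order
def findbraceA_fold (cs : List Char) (left right : Char) :
    List (Int × Char) → (Int × Int × List String) → (Int × Int × List String)
  | [], st => st
  | (k, a) :: rest, (flag, L, lst) =>
    if a == left then
      findbraceA_fold cs left right rest
        (flag + 1, if flag + 1 == 1 then k else L, lst)
    else if a == right then
      findbraceA_fold cs left right rest
        (flag - 1, L,
         if flag == 1 then lst ++ [String.ofList (PySem.List.slice cs (some L) (some (k + 1)))] else lst)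
    else findbraceA_fold cs left right rest (flag, L, lst)

def findbrace (s : String) (b : String) : List String :=
  match b.toList with
  | [left, right] =>
    (findbraceA_fold s.toList left right (PySem.List.enumerate s.toList 0) (0, 0, [])).2.2
  | _ => []  -- the tuple unpacking of b raises ValueError in Python unless len(b) == 2; excluded by Pre_

-- ===== PORT B =====
-- first pass of Source B: d[k] = lefts-minus-rights in s[:k] (accumulator f)
def findbraceB_depths (left right : Char) : List Char → Int → List Int
  | [], _ => []
  | a :: rest, f =>
    f :: findbraceB_depths left right rest
           (f + (if a == left then 1 else if a == right then -1 else 0))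

-- second pass of Source B over enumerate(zip(s, d)): state (L, out), no counter
def findbraceB_fold (cs : List Char) (left right : Char) :
    List (Int × (Char × Int)) → (Int × List String) → (Int × List String)
  | [], st => st
  | (k, (a, dk)) :: rest, (L, out) =>
    if a == left then
      findbraceB_fold cs left right rest (if dk == 0 then k else L, out)
    else if a == right && dk == 1 then
      findbraceB_fold cs left right rest
        (L, out ++ [String.ofList (PySem.List.slice cs (some L) (some (k + 1)))])
    else findbraceB_fold cs left right rest (L, out)

def findbrace_alt (s : String) (b : String) : List String :=
  -- tuple unpacking of b (raises ValueError unless len(b) == 2; excluded by Pre_)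
  if b.toList.length = 2 then
    let left := b.toList.headD ' '
    let right := (b.toList.drop 1).headD ' '
    let cs := s.toList
    let d := findbraceB_depths left right cs 0
    (findbraceB_fold cs left right (PySem.List.enumerate (cs.zip d) 0) (0, [])).2
  else []

-- ===== PRECONDITION & SPEC =====
-- Pre_ excludes b of length ≠ 2, where A's tuple unpacking of b raises ValueError (B raises too).
def Pre_findbrace (s : String) (b : String) : Prop := b.toList.length = 2
instance (s : String) (b : String) : Decidable (Pre_findbrace s b) := by unfold Pre_findbrace; infer_instance
def pvWitness_findbrace : String × String := ("aaa{bbb{ccc}ddd}eee{fff}", "{}")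

def Spec_findbrace (s : String) (b : String) (out : List String) : Prop := out = findbrace_alt s b
instance (s : String) (b : String) (out : List String) : Decidable (Spec_findbrace s b out) := by unfold Spec_findbrace; infer_instance

-- ===== CLAIM (what is proved, stated in full; the proofs are below) =====
def Claim_equal_findbrace : Prop := ∀ (s : String) (b : String), Dom_findbrace s b → Pre_findbrace s b → Spec_findbrace s b (findbrace s b)

-- ===== LEMMAS AND PROOFS =====

-- loop invariant: B's pass over (suffix zipped with its depths-from-flag) tracks A's pass exactly
theorem findbrace_loops_eq (cs : List Char) (left right : Char) :
    ∀ (rest : List Char) (k0 flag L : Int) (lst : List String),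
      (findbraceA_fold cs left right (PySem.List.enumerate rest k0) (flag, L, lst)).2.2
      = (findbraceB_fold cs left right
          (PySem.List.enumerate (rest.zip (findbraceB_depths left right rest flag)) k0) (L, lst)).2 := by
  intro rest
  induction rest with
  | nil => intro k0 flag L lst; simp [PySem.List.enumerate_nil, findbraceA_fold, findbraceB_fold, findbraceB_depths]
  | cons a t ih =>
    intro k0 flag L lst
    simp only [findbraceB_depths, List.zip_cons_cons, PySem.List.enumerate_cons,
      findbraceA_fold, findbraceB_fold]
    by_cases hl : a == left
    · simp only [hl]
      have h1 : (flag + 1 == 1) = (flag == 0) := by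
        by_cases h : flag = 0 <;> simp [h]
      rw [h1]
      by_cases h0 : flag == 0
      · have : flag = 0 := by simpa using h0
        simp only [this]
        simpa using ih (k0 + 1) 1 k0 lst
      · simp only [h0]
        have := ih (k0 + 1) (flag + 1) L lst
        simpa using this
    · simp only [hl]
      by_cases hr : a == right
      · simp only [hr, Bool.true_and]
        by_cases h1 : flag == 1
        · have : flag = 1 := by simpa using h1
          simp only [this]
          simpa using ih (k0 + 1) 0 L (lst ++ [String.ofList (PySem.List.slice cs (some L) (some (k0 + 1)))])
        · simp only [h1]
          simpa using ih (k0 + 1) (flag - 1) L lst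
      · simp only [hr]
        simpa using ih (k0 + 1) flag L lst

-- ===== VERDICT (by name: the statement is the Claim_ definition above) =====
theorem findbrace_spec : Claim_equal_findbrace := by
  intro s b _ hpre
  unfold Spec_findbrace findbrace findbrace_alt
  unfold Pre_findbrace at hpre
  match hb : b.toList with
  | [left, right] =>
    simp only [List.length_cons, List.length_nil, if_pos, List.headD, List.drop]
    exact findbrace_loops_eq s.toList left right s.toList 0 0 0 []
  | [] => simp [hb] at hpre
  | [_] => simp [hb] at hpre
  | _ :: _ :: _ :: _ => simp [hb] at hpre
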